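-- pv_equiv track=rewrite | github.com/nOOne-is-hier/AgentFlow | backend/app.py | _autopatch_edges
-- ===== SOURCE A (Python) =====
-- def _autopatch_edges(wf: dict) -> dict:
--     """노드 간 필수 엣지가 빠졌을 때 PoC용으로 자동 보강."""
--     nodes = {n["id"]: n for n in wf.get("nodes", [])}
--     edges = list(wf.get("edges", []))
--
--     def _has(frm, to):
--         return any(e.get("from") == frm and e.get("to") == to for e in edges)
--
--     if (
--         "parse_pdf" in nodes
--         and "merge_xlsx" in nodes
--         and not _has("parse_pdf", "merge_xlsx")
--     ):
--         edges.append({"from": "parse_pdf", "to": "merge_xlsx"})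
--     if (
--         "embed_pdf" in nodes
--         and "validate" in nodes
--         and not _has("embed_pdf", "validate")
--     ):
--         edges.append({"from": "embed_pdf", "to": "validate"})
--
--     wf["edges"] = edges
--     return wf
-- ===== SOURCE B (Python) =====
-- def _autopatch_edges(wf: dict) -> dict:
--     """Worklist algorithm: build the pending list of required edges whose endpoints
--     exist, cross pairs off it during ONE traversal of the edge list, then append
--     whatever survives.  (Mutates wf["edges"] in place like the original.)"""
--     node_ids = {n["id"] for n in wf.get("nodes", [])}
--     edges = list(wf.get("edges", []))
--     pending = [
--         (frm, to)
--         for frm, to in (("parse_pdf", "merge_xlsx"), ("embed_pdf", "validate"))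
--         if frm in node_ids and to in node_ids
--     ]
--     for e in edges:
--         pair = (e.get("from"), e.get("to"))
--         if pair in pending:
--             pending.remove(pair)
--     wf["edges"] = edges + [{"from": frm, "to": to} for frm, to in pending]
--     return wf
-- ===== Notes on version B (the rewrite author's own statement) =====
-- stated objective: alternative
-- what changed: Replaces A's per-required-edge rescans of the edge list (a _has linear scan inside each hardcoded branch) with a worklist algorithm: build a pending list of required edges whose endpoints exist, make ONE pass over the edge list crossing seen (from,to) pairs off the worklist, then append the surviving pending edges.
import Mathlib
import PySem

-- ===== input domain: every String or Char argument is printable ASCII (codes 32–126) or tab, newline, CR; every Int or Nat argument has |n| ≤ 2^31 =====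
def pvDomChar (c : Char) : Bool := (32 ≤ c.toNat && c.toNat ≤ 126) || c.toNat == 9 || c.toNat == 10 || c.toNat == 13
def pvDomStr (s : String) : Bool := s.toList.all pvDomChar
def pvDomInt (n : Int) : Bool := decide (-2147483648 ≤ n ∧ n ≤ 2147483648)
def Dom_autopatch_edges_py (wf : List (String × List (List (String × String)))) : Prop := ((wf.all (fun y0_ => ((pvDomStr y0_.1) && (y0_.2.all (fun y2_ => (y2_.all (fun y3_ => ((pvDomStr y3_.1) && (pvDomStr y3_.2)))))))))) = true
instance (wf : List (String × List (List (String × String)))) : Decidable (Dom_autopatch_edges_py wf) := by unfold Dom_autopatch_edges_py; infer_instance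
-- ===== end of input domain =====

-- B replaces A's per-branch rescans with a worklist crossed off in one pass; return values are equal.
-- Both programs mutate wf in place identically (wf["edges"] = edges…); the claim is about the returned dict.

-- ===== PORT A =====
-- `_has(frm, to)` of A: linear scan of the edges list
def pvHasA (edges : List (List (String × String))) (frm tgt : String) : Bool :=
  edges.any (fun e =>
    ((PySem.Dict.mk e).get? "from" == some frm) && ((PySem.Dict.mk e).get? "to" == some tgt))

def autopatch_edges_py (wf : List (String × List (List (String × String)))) : List (String × List (List (String × String))) :=
  -- nodes = {n["id"]: n for n in wf.get("nodes", [])}; n["id"] raises KeyError when absent (excluded by Pre_),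
  -- so the port reads it with getD "" — exact on Pre_ inputs.
  let nodes : PySem.Dict String (List (String × String)) :=
    ((PySem.Dict.mk wf).getD "nodes" []).foldl
      (fun d n => d.insert ((PySem.Dict.mk n).getD "id" "") n) PySem.Dict.empty
  let edges0 := (PySem.Dict.mk wf).getD "edges" []
  let edges1 :=
    if nodes.contains "parse_pdf" && nodes.contains "merge_xlsx" &&
        !(pvHasA edges0 "parse_pdf" "merge_xlsx") then
      edges0 ++ [[("from", "parse_pdf"), ("to", "merge_xlsx")]]
    else edges0
  let edges2 :=
    if nodes.contains "embed_pdf" && nodes.contains "validate" &&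
        !(pvHasA edges1 "embed_pdf" "validate") then
      edges1 ++ [[("from", "embed_pdf"), ("to", "validate")]]
    else edges1
  ((PySem.Dict.mk wf).insert "edges" edges2).items

-- ===== PORT B =====
-- pair = (e.get("from"), e.get("to"))  — an (Option × Option) pair
def pvPairB (e : List (String × String)) : Option String × Option String :=
  ((PySem.Dict.mk e).get? "from", (PySem.Dict.mk e).get? "to")

-- `if pair in pending: pending.remove(pair)` — pending holds String pairs, so an
-- Option pair with a None component is never in it; membership/removal are exact.
def pvStepB (pend : List (String × String)) (e : List (String × String)) : List (String × String) :=
  match pvPairB e with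
  | (some a, some b) => if pend.contains (a, b) then pend.erase (a, b) else pend
  | _ => pend

def autopatch_edges_py_alt (wf : List (String × List (List (String × String)))) : List (String × List (List (String × String))) :=
  -- node_ids = {n["id"] for n in wf.get("nodes", [])} (n["id"] read with getD "" — exact on Pre_ inputs)
  let nodeIds : PySem.Set String :=
    PySem.Set.ofList (((PySem.Dict.mk wf).getD "nodes" []).map (fun n => (PySem.Dict.mk n).getD "id" ""))
  let edges0 := (PySem.Dict.mk wf).getD "edges" []
  let pending0 : List (String × String) :=
    [("parse_pdf", "merge_xlsx"), ("embed_pdf", "validate")].filter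
      (fun p => PySem.Set.contains nodeIds p.1 && PySem.Set.contains nodeIds p.2)
  let pending := edges0.foldl pvStepB pending0
  ((PySem.Dict.mk wf).insert "edges"
      (edges0 ++ pending.map (fun p => [("from", p.1), ("to", p.2)]))).items

-- ===== PRECONDITION & SPEC =====
-- Pre_ excludes workflows where some node dict lacks the "id" key: there A (and B) raise KeyError.
def Pre_autopatch_edges_py (wf : List (String × List (List (String × String)))) : Prop :=
  ∀ n ∈ (PySem.Dict.mk wf).getD "nodes" [], ((PySem.Dict.mk n).get? "id").isSome = true
instance (wf : List (String × List (List (String × String)))) : Decidable (Pre_autopatch_edges_py wf) := by unfold Pre_autopatch_edges_py; infer_instance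
def pvWitness_autopatch_edges_py : (List (String × List (List (String × String)))) :=
  [("nodes", [[("id", "parse_pdf")], [("id", "merge_xlsx")]]), ("edges", [])]

def Spec_autopatch_edges_py (wf : List (String × List (List (String × String)))) (out : List (String × List (List (String × String)))) : Prop := out = autopatch_edges_py_alt wf
instance (wf : List (String × List (List (String × String)))) (out : List (String × List (List (String × String)))) : Decidable (Spec_autopatch_edges_py wf out) := by unfold Spec_autopatch_edges_py; infer_instance

-- ===== CLAIM (what is proved, stated in full; the proofs are below) =====
def Claim_equal_autopatch_edges_py : Prop := ∀ (wf : List (String × List (List (String × String)))), Dom_autopatch_edges_py wf → Pre_autopatch_edges_py wf → Spec_autopatch_edges_py wf (autopatch_edges_py wf)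

-- ===== LEMMAS AND PROOFS =====

-- A's node-dict membership equals B's node-id-set membership
theorem pv_contains_eq (l : List (List (String × String))) (k : String) :
    (l.foldl (fun d n => d.insert ((PySem.Dict.mk n).getD "id" "") n)
      (PySem.Dict.empty : PySem.Dict String (List (String × String)))).contains k
    = PySem.Set.contains (PySem.Set.ofList (l.map (fun n => (PySem.Dict.mk n).getD "id" ""))) k := by
  rw [PySem.Dict.contains_eq_decide_mem_keys, PySem.Dict.keys_foldl_insert_key]
  simp [PySem.Set.contains_eq_listContains, PySem.Set.mem_ofList]

-- one worklist step = filtering out the pair this edge carries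
theorem pv_step_eq_filter (pend : List (String × String)) (e : List (String × String))
    (h : pend.Nodup) :
    pvStepB pend e = pend.filter (fun p => !((some p.1, some p.2) == pvPairB e)) := by
  unfold pvStepB
  rcases hpr : pvPairB e with ⟨f?, t?⟩
  match f?, t? with
  | some a, some b =>
    by_cases hc : (a, b) ∈ pend
    · simp only [List.contains_iff_mem, hc, if_pos]
      rw [List.Nodup.erase_eq_filter h (a, b)]
      apply List.filter_congr
      intro p _
      rcases p with ⟨x, y⟩
      rw [Bool.eq_iff_iff]
      simp [Prod.ext_iff]
    · simp only [List.contains_iff_mem, hc, if_neg, not_false_eq_true]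
      rw [eq_comm]
      apply List.filter_eq_self.2
      intro p hp
      rcases p with ⟨x, y⟩
      simp only [Bool.not_eq_eq_eq_not, Bool.not_true, beq_eq_false_iff_ne, ne_eq,
        Prod.ext_iff, Option.some.injEq, not_and]
      rintro rfl rfl
      exact hc hp
  | none, _ =>
      rw [eq_comm]
      apply List.filter_eq_self.2
      intro p _
      simp
  | some _, none =>
      rw [eq_comm]
      apply List.filter_eq_self.2
      intro p _
      simp

-- the whole pass = filtering the worklist by "no edge carries this pair"
theorem pv_fold_eq_filter (edges : List (List (String × String)))
    (pend : List (String × String)) (h : pend.Nodup) :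
    edges.foldl pvStepB pend
      = pend.filter (fun p => !(edges.any (fun e => (some p.1, some p.2) == pvPairB e))) := by
  induction edges generalizing pend with
  | nil => simp
  | cons e es ih =>
    rw [List.foldl_cons, pv_step_eq_filter _ _ h, ih _ (h.filter _), List.filter_filter]
    apply List.filter_congr
    intro p _
    rw [Bool.eq_iff_iff]
    simp [List.any_cons, and_comm]
  
-- B's per-pair membership test equals A's `_has`
theorem pv_any_eq_has (edges : List (List (String × String))) (f t : String) :
    (edges.any (fun e => (some f, some t) == pvPairB e)) = pvHasA edges f t := by
  unfold pvHasA pvPairB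
  refine List.any_congr rfl ?_
  intro e
  rw [Bool.eq_iff_iff]
  rcases h1 : (PySem.Dict.mk e).get? "from" with _ | a
  case none => simp
  case some =>
    rcases h2 : (PySem.Dict.mk e).get? "to" with _ | b
    · simp
    · simp only [beq_iff_eq, Prod.mk.injEq, Option.some.injEq, Bool.and_eq_true]
      tauto

-- appending the first required edge does not affect the second `_has` test
theorem pv_has_append (edges : List (List (String × String))) :
    pvHasA (edges ++ [[("from", "parse_pdf"), ("to", "merge_xlsx")]]) "embed_pdf" "validate"
    = pvHasA edges "embed_pdf" "validate" := by
  simp only [pvHasA, List.any_append, List.any_cons, List.any_nil, Bool.or_false]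
  have h : (((PySem.Dict.mk [("from", "parse_pdf"), ("to", "merge_xlsx")]).get? "from" == some "embed_pdf")
      && ((PySem.Dict.mk [("from", "parse_pdf"), ("to", "merge_xlsx")]).get? "to" == some "validate")) = false := by
    decide
  rw [h, Bool.or_false]

-- ===== VERDICT (by name: the statement is the Claim_ definition above) =====
theorem autopatch_edges_py_spec : Claim_equal_autopatch_edges_py := by
  intro wf _ _
  show autopatch_edges_py wf = autopatch_edges_py_alt wf
  unfold autopatch_edges_py autopatch_edges_py_alt
  simp only [pv_contains_eq]
  set S := PySem.Set.ofList
      (((PySem.Dict.mk wf).getD "nodes" []).map (fun n => (PySem.Dict.mk n).getD "id" "")) with hS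
  set E := (PySem.Dict.mk wf).getD "edges" [] with hE
  have hnodup : ∀ c1 c2 : Bool,
      ([(("parse_pdf" : String), ("merge_xlsx" : String)), ("embed_pdf", "validate")].filter
        (fun p => (if p = ("parse_pdf", "merge_xlsx") then c1 else c2))).Nodup := by
    intro c1 c2
    rcases c1 <;> rcases c2 <;> decide
  have hfilt :
      ([(("parse_pdf" : String), ("merge_xlsx" : String)), ("embed_pdf", "validate")].filter
        (fun p => PySem.Set.contains S p.1 && PySem.Set.contains S p.2))
      = ([(("parse_pdf" : String), ("merge_xlsx" : String)), ("embed_pdf", "validate")].filter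
        (fun p => (if p = ("parse_pdf", "merge_xlsx")
            then PySem.Set.contains S "parse_pdf" && PySem.Set.contains S "merge_xlsx"
            else PySem.Set.contains S "embed_pdf" && PySem.Set.contains S "validate"))) := by
    apply List.filter_congr
    intro p hp
    fin_cases hp <;> simp
  rw [hfilt, pv_fold_eq_filter _ _ (hnodup _ _)]
  rcases h1 : (PySem.Set.contains S "parse_pdf" && PySem.Set.contains S "merge_xlsx") <;>
    rcases h2 : (PySem.Set.contains S "embed_pdf" && PySem.Set.contains S "validate") <;>
    simp only [List.filter_cons, if_pos, List.filter, pv_any_eq_has] <;>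
    rcases h3 : pvHasA E "parse_pdf" "merge_xlsx" <;>
    rcases h4 : pvHasA E "embed_pdf" "validate" <;>
    simp [h4, pv_has_append, List.append_assoc]
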